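-- pv_equiv track=rewrite | github.com/Smith-Danielle/PythonPractice1 | main.py | smile
-- ===== SOURCE A (Python) =====
-- def smile(text):
--     for x in range(len(text)):
--         if text[x] == ":" or text[x] == ";" or text[x] == "=":
--             if x != len(text) - 1:
--                 if text[x + 1] == "(":
--                     text = text[0: x + 1] + ")" + text[x + 2:]
--                 if text[x + 1] == "[":
--                     text = text[0: x + 1] + "]" + text[x + 2:]
--                 if text[x + 1] == "-" or text[x + 1] == "~":
--                     if x != len(text) - 2:
--                         if text[x + 2] == "(":
--                             text = text[0: x + 2] + ")" + text[x + 3:]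
--                         if text[x + 2] == "[":
--                             text = text[0: x + 2] + "]" + text[x + 3:]
--     return text
-- ===== SOURCE B (Python) =====
-- def smile(text):
--     out = []
--     i = 0
--     n = len(text)
--     while i < n:
--         c = text[i]
--         if c in ":;=":
--             if i + 1 < n and text[i + 1] in "([":
--                 out.append(c)
--                 out.append(")" if text[i + 1] == "(" else "]")
--                 i += 2
--                 continue
--             if i + 2 < n and text[i + 1] in "-~" and text[i + 2] in "([":
--                 out.append(c)
--                 out.append(text[i + 1])
--                 out.append(")" if text[i + 2] == "(" else "]")
--                 i += 3
--                 continue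
--         out.append(c)
--         i += 1
--     return "".join(out)
-- ===== Notes on version B (the rewrite author's own statement) =====
-- stated objective: alternative
-- what changed: A repeatedly rebuilds the whole string by slicing inside an index loop over the mutating text; B makes one left-to-right pass that emits each character once, flipping the bracket of a starter(+optional nose) emoticon as it goes.
import Mathlib
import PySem

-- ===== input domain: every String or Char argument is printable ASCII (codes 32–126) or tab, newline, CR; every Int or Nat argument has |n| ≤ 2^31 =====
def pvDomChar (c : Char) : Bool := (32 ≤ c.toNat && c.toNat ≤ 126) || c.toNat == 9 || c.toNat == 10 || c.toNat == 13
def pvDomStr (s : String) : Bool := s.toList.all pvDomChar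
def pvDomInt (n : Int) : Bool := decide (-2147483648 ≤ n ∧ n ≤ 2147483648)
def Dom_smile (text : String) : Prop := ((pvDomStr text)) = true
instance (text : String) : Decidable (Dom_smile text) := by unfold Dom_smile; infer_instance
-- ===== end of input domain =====

-- B replaces A's repeated slice-and-rebuild index scan by one left-to-right pass that emits
-- each character (or a flipped emoticon) exactly once; same return value on every string.

-- ===== PORT A =====
-- helper for the repeated Python pattern `text = text[0:i] + rep + text[i+1:]` guarded by
-- `if text[i] == ch:`  (indices read are in range here, so getD reads exactly Python's
-- text[i]; take/drop are exact for these non-negative slice bounds)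
def pvFlip (t : List Char) (i : Nat) (ch rep : Char) : List Char :=
  if t.getD i ' ' = ch then t.take i ++ rep :: t.drop (i + 1) else t

-- A's inner `if text[x+1] == "-" or text[x+1] == "~":` block, on the current text t2
def pvNose (t2 : List Char) (x : Nat) : List Char :=
  if t2.getD (x + 1) ' ' = '-' ∨ t2.getD (x + 1) ' ' = '~' then
    if x ≠ t2.length - 2 then
      pvFlip (pvFlip t2 (x + 2) '(' ')') (x + 2) '[' ']'
    else t2
  else t2

-- the body of A's `for x in range(len(text))` loop, step for step
def pvStepA (t : List Char) (x : Nat) : List Char :=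
  if t.getD x ' ' = ':' ∨ t.getD x ' ' = ';' ∨ t.getD x ' ' = '=' then
    if x ≠ t.length - 1 then
      pvNose (pvFlip (pvFlip t (x + 1) '(' ')') (x + 1) '[' ']') x
    else t
  else t

def smile (text : String) : String :=
  String.ofList (List.foldl pvStepA text.toList (List.range text.toList.length))

-- ===== PORT B =====
-- Source B's single pass: consume 2 chars on starter+bracket, 3 on starter+nose+bracket, else 1
def pvGoB : List Char → List Char
  | [] => []
  | [c] => [c]
  | [c, b] =>
    if c = ':' ∨ c = ';' ∨ c = '=' then
      if b = '(' then [c, ')']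
      else if b = '[' then [c, ']']
      else c :: pvGoB [b]
    else c :: pvGoB [b]
  | c :: b :: b2 :: rest =>
    if c = ':' ∨ c = ';' ∨ c = '=' then
      if b = '(' then c :: ')' :: pvGoB (b2 :: rest)
      else if b = '[' then c :: ']' :: pvGoB (b2 :: rest)
      else if b = '-' ∨ b = '~' then
        if b2 = '(' then c :: b :: ')' :: pvGoB rest
        else if b2 = '[' then c :: b :: ']' :: pvGoB rest
        else c :: pvGoB (b :: b2 :: rest)
      else c :: pvGoB (b :: b2 :: rest)
    else c :: pvGoB (b :: b2 :: rest)
termination_by l => l.length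
decreasing_by all_goals (simp; try omega)

def smile_alt (text : String) : String := String.ofList (pvGoB text.toList)

-- ===== PRECONDITION & SPEC =====
def Spec_smile (text : String) (out : String) : Prop := out = smile_alt text
instance (text : String) (out : String) : Decidable (Spec_smile text out) := by unfold Spec_smile; infer_instance

-- ===== CLAIM (what is proved, stated in full; the proofs are below) =====
def Claim_equal_smile : Prop := ∀ (text : String), Dom_smile text → Spec_smile text (smile text)

-- ===== LEMMAS AND PROOFS =====

theorem pvGetD_app {α : Type} (p s : List α) (j : Nat) (d : α) :
    (p ++ s).getD (p.length + j) d = s.getD j d := by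
  rw [List.getD_append_right _ _ _ _ (Nat.le_add_right _ _), Nat.add_sub_cancel_left]

theorem pvTake_app {α : Type} : ∀ (p s : List α) (j : Nat),
    (p ++ s).take (p.length + j) = p ++ s.take j := by
  intro p
  induction p with
  | nil => simp
  | cons a p ih =>
    intro s j
    simp only [List.cons_append, List.length_cons]
    rw [show p.length + 1 + j = (p.length + j) + 1 by omega, List.take_succ_cons, ih]

theorem pvDrop_app {α : Type} : ∀ (p s : List α) (j : Nat),
    (p ++ s).drop (p.length + j) = s.drop j := by
  intro p
  induction p with
  | nil => simp
  | cons a p ih =>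
    intro s j
    simp only [List.cons_append, List.length_cons]
    rw [show p.length + 1 + j = (p.length + j) + 1 by omega, List.drop_succ_cons, ih]

theorem pvFlip_length (t : List Char) (i : Nat) (ch rep : Char) (h : ch ≠ ' ') :
    (pvFlip t i ch rep).length = t.length := by
  unfold pvFlip
  split
  · rename_i hg
    have hi : i < t.length := by
      by_contra hni
      rw [List.getD_eq_default _ _ (by omega)] at hg
      exact h hg.symm
    simp [List.length_take, List.length_drop]
    omega
  · rfl

theorem pvFlip_shift (p s : List Char) (j : Nat) (ch rep : Char) :
    pvFlip (p ++ s) (p.length + j) ch rep = p ++ pvFlip s j ch rep := by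
  unfold pvFlip
  rw [pvGetD_app]
  split
  · rw [pvTake_app, show p.length + j + 1 = p.length + (j + 1) by omega, pvDrop_app]
    simp
  · rfl

theorem pvNose_shift (p s2 : List Char) (j : Nat) (h : j + 2 ≤ s2.length) :
    pvNose (p ++ s2) (p.length + j) = p ++ pvNose s2 j := by
  unfold pvNose
  rw [show p.length + j + 1 = p.length + (j + 1) by omega, pvGetD_app]
  split
  · have hlen : (p ++ s2).length = p.length + s2.length := List.length_append ..
    by_cases h2 : j ≠ s2.length - 2
    · have h2' : p.length + j ≠ (p ++ s2).length - 2 := by rw [hlen]; omega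
      rw [if_pos h2', if_pos h2]
      rw [show p.length + j + 2 = p.length + (j + 2) by omega, pvFlip_shift, pvFlip_shift]
    · have h2' : ¬ p.length + j ≠ (p ++ s2).length - 2 := by rw [hlen]; omega
      rw [if_neg h2', if_neg h2]
  · rfl

theorem pvStepA_shift (p s : List Char) (j : Nat) (hj : j < s.length) :
    pvStepA (p ++ s) (p.length + j) = p ++ pvStepA s j := by
  unfold pvStepA
  rw [pvGetD_app]
  split
  · have hlen : (p ++ s).length = p.length + s.length := List.length_append ..
    by_cases h1 : j ≠ s.length - 1
    · have h1' : p.length + j ≠ (p ++ s).length - 1 := by rw [hlen]; omega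
      rw [if_pos h1', if_pos h1]
      rw [show p.length + j + 1 = p.length + (j + 1) by omega, pvFlip_shift, pvFlip_shift]
      set s2 := pvFlip (pvFlip s (j + 1) '(' ')') (j + 1) '[' ']' with hs2
      have hs2len : s2.length = s.length := by
        rw [hs2, pvFlip_length _ _ _ _ (by decide), pvFlip_length _ _ _ _ (by decide)]
      exact pvNose_shift p s2 j (by omega)
    · have h1' : ¬ p.length + j ≠ (p ++ s).length - 1 := by rw [hlen]; omega
      rw [if_neg h1', if_neg h1]
  · rfl

theorem pvNose_length (t2 : List Char) (x : Nat) : (pvNose t2 x).length = t2.length := by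
  unfold pvNose
  split
  · split
    · rw [pvFlip_length _ _ _ _ (by decide), pvFlip_length _ _ _ _ (by decide)]
    · rfl
  · rfl

theorem pvStepA_length (t : List Char) (x : Nat) : (pvStepA t x).length = t.length := by
  unfold pvStepA
  split
  · split
    · rw [pvNose_length, pvFlip_length _ _ _ _ (by decide), pvFlip_length _ _ _ _ (by decide)]
    · rfl
  · rfl

theorem pvFold_shift (k : Nat) : ∀ (s p : List Char) (a : Nat), a + k ≤ s.length →
    List.foldl pvStepA (p ++ s) (List.range' (p.length + a) k)
      = p ++ List.foldl pvStepA s (List.range' a k) := by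
  induction k with
  | zero => intro s p a _; simp
  | succ k ih =>
    intro s p a h
    rw [List.range'_succ, List.range'_succ, List.foldl_cons, List.foldl_cons]
    rw [pvStepA_shift p s a (by omega)]
    have hlen : (pvStepA s a).length = s.length := pvStepA_length s a
    rw [show p.length + a + 1 = p.length + (a + 1) by omega]
    exact ih (pvStepA s a) p (a + 1) (by omega)

theorem pvGoB_cons_not (c : Char) (l : List Char)
    (h : ¬(c = ':' ∨ c = ';' ∨ c = '=')) : pvGoB (c :: l) = c :: pvGoB l := by
  match l with
  | [] => simp [pvGoB]
  | [b] => simp [pvGoB, h]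
  | b :: b2 :: r => simp [pvGoB, h]

theorem pvRun_eq_goB : ∀ (n : Nat) (s : List Char), s.length ≤ n →
    List.foldl pvStepA s (List.range' 0 s.length) = pvGoB s := by
  intro n
  induction n with
  | zero =>
    intro s h
    match s with
    | [] => simp [pvGoB]
    | c :: t => simp at h
  | succ n ih =>
    intro s hsn
    match s with
    | [] => simp [pvGoB]
    | [c] =>
      have h0 : pvStepA [c] 0 = [c] := by unfold pvStepA; simp [List.getD]
      simp [pvGoB, List.range'_succ, h0]
    | [c, b] =>
      have cont : ∀ (c' b' : Char),
          List.foldl pvStepA [c', b'] (List.range' 1 1) = c' :: pvGoB [b'] := by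
        intro c' b'
        have h := pvFold_shift 1 [b'] [c'] 0 (by simp)
        simp only [List.length_cons, List.length_nil, Nat.zero_add] at h
        rw [show ([c', b'] : List Char) = [c'] ++ [b'] by rfl, h]
        rw [show List.range' 0 1 = List.range' 0 ([b'] : List Char).length by rfl,
          ih [b'] (by simp at hsn ⊢; omega)]
        rfl
      rw [show ([c, b] : List Char).length = 2 by rfl, List.range'_succ, List.foldl_cons]
      by_cases hc : c = ':' ∨ c = ';' ∨ c = '='
      · by_cases hb1 : b = '('
        · have h0 : pvStepA [c, b] 0 = [c, ')'] := by
            unfold pvStepA pvNose pvFlip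
            simp [hc, hb1, List.getD]
          rw [h0, cont c ')']
          simp [pvGoB, hc, hb1]
        · by_cases hb2 : b = '['
          · have h0 : pvStepA [c, b] 0 = [c, ']'] := by
              unfold pvStepA pvNose pvFlip
              simp [hc, hb1, hb2, List.getD]
            rw [h0, cont c ']']
            simp [pvGoB, hc, hb1, hb2]
          · have h0 : pvStepA [c, b] 0 = [c, b] := by
              unfold pvStepA pvNose pvFlip
              simp [hc, hb1, hb2, List.getD]
            rw [h0, cont c b]
            simp [pvGoB, hc, hb1, hb2]
      · have h0 : pvStepA [c, b] 0 = [c, b] := by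
          unfold pvStepA; simp [hc, List.getD]
        rw [h0, cont c b]
        simp [pvGoB, hc]
    | c :: b :: b2 :: rest =>
      have hlen3 : (c :: b :: b2 :: rest).length = rest.length + 3 := by simp
      have cont : ∀ (c' : Char) (s' : List Char), s'.length = rest.length + 2 →
          List.foldl pvStepA (c' :: s') (List.range' 1 (rest.length + 2))
            = c' :: pvGoB s' := by
        intro c' s' hs'
        have h := pvFold_shift (rest.length + 2) s' [c'] 0 (by omega)
        simp only [List.length_cons, List.length_nil, Nat.zero_add] at h
        rw [show (c' :: s' : List Char) = [c'] ++ s' by rfl, h]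
        rw [show List.range' 0 (rest.length + 2) = List.range' 0 s'.length by rw [hs'],
          ih s' (by simp at hsn; omega)]
        rfl
      rw [hlen3, List.range'_succ, List.foldl_cons]
      by_cases hc : c = ':' ∨ c = ';' ∨ c = '='
      · by_cases hb1 : b = '('
        · have h0 : pvStepA (c :: b :: b2 :: rest) 0 = c :: ')' :: b2 :: rest := by
            unfold pvStepA pvNose pvFlip
            simp [hc, hb1, List.getD]
          rw [h0, cont c (')' :: b2 :: rest) (by simp), pvGoB_cons_not ')' _ (by decide)]
          simp [pvGoB, hc, hb1]
        · by_cases hb2 : b = '['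
          · have h0 : pvStepA (c :: b :: b2 :: rest) 0 = c :: ']' :: b2 :: rest := by
              unfold pvStepA pvNose pvFlip
              simp [hc, hb1, hb2, List.getD]
            rw [h0, cont c (']' :: b2 :: rest) (by simp), pvGoB_cons_not ']' _ (by decide)]
            simp [pvGoB, hc, hb1, hb2]
          · by_cases hb3 : b = '-' ∨ b = '~'
            · obtain ⟨hbp1, hbp2, hbp3⟩ :
                  b ≠ '(' ∧ b ≠ '[' ∧ ¬(b = ':' ∨ b = ';' ∨ b = '=') := by
                rcases hb3 with h | h <;> subst h <;> exact ⟨by decide, by decide, by decide⟩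
              by_cases hb4 : b2 = '('
              · have h0 : pvStepA (c :: b :: b2 :: rest) 0 = c :: b :: ')' :: rest := by
                  unfold pvStepA pvNose pvFlip
                  simp [hc, hb1, hb2, hb3, hb4, List.getD]
                rw [h0, cont c (b :: ')' :: rest) (by simp), pvGoB_cons_not b _ hbp3,
                  pvGoB_cons_not ')' _ (by decide)]
                simp [pvGoB, hc, hb1, hb2, hb3, hb4]
              · by_cases hb5 : b2 = '['
                · have h0 : pvStepA (c :: b :: b2 :: rest) 0 = c :: b :: ']' :: rest := by
                    unfold pvStepA pvNose pvFlip
                    simp [hc, hb1, hb2, hb3, hb4, hb5, List.getD]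
                  rw [h0, cont c (b :: ']' :: rest) (by simp), pvGoB_cons_not b _ hbp3,
                    pvGoB_cons_not ']' _ (by decide)]
                  simp [pvGoB, hc, hb1, hb2, hb3, hb4, hb5]
                · have h0 : pvStepA (c :: b :: b2 :: rest) 0 = c :: b :: b2 :: rest := by
                    unfold pvStepA pvNose pvFlip
                    simp [hc, hb1, hb2, hb3, hb4, hb5, List.getD]
                  rw [h0, cont c (b :: b2 :: rest) (by simp)]
                  simp [pvGoB, hc, hb1, hb2, hb3, hb4, hb5]
            · have h0 : pvStepA (c :: b :: b2 :: rest) 0 = c :: b :: b2 :: rest := by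
                unfold pvStepA pvNose pvFlip
                simp [hc, hb1, hb2, hb3, List.getD]
              rw [h0, cont c (b :: b2 :: rest) (by simp)]
              simp [pvGoB, hc, hb1, hb2, hb3]
      · have h0 : pvStepA (c :: b :: b2 :: rest) 0 = c :: b :: b2 :: rest := by
          unfold pvStepA; simp [hc, List.getD]
        rw [h0, cont c (b :: b2 :: rest) (by simp)]
        simp [pvGoB, hc]

-- ===== VERDICT (by name: the statement is the Claim_ definition above) =====
theorem smile_spec : Claim_equal_smile := by
  intro text _
  unfold Spec_smile smile smile_alt
  rw [List.range_eq_range', pvRun_eq_goB text.toList.length text.toList (le_refl _)]
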